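-- pv_equiv track=rewrite | github.com/samuelassaraf/snake-genetic-algorithm-neural-network | serpent.py | presence_queue
-- ===== SOURCE A (Python) =====
-- taille_case = 20
--
-- def presence_queue(serpent):
--     tete = serpent[0]
--     obstacle_vector = [0, 0, 0, 0]  # Vecteur de dimension 4 initialement rempli de zéros
--     if any(partie[0] == tete[0] - taille_case and partie[1] == tete[1] for partie in serpent):
--         obstacle_vector[0] = 1  # GAUCHE
--     if any(partie[0] == tete[0] + taille_case and partie[1] == tete[1] for partie in serpent):
--         obstacle_vector[1] = 1  # DROITE
--     if any(partie[1] == tete[1] - taille_case and partie[0] == tete[0] for partie in serpent):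
--         obstacle_vector[2] = 1  # HAUT
--     if any(partie[1] == tete[1] + taille_case and partie[0] == tete[0] for partie in serpent):
--         obstacle_vector[3] = 1  # BAS
--     return obstacle_vector
-- ===== SOURCE B (Python) =====
-- taille_case = 20
--
-- def presence_queue(serpent):
--     tx, ty = serpent[0]
--     gauche = droite = haut = bas = 0
--     for px, py in serpent:
--         dx = px - tx
--         dy = py - ty
--         if dy == 0:
--             if dx == -taille_case:
--                 gauche = 1
--             elif dx == taille_case:
--                 droite = 1
--         elif dx == 0:
--             if dy == -taille_case:
--                 haut = 1
--             elif dy == taille_case: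
--                 bas = 1
--     return [gauche, droite, haut, bas]
-- ===== Notes on version B (the rewrite author's own statement) =====
-- stated objective: alternative
-- what changed: Replaces four separate any-scans over the snake body by a single pass that classifies each segment's offset from the head into the four direction flags.
import Mathlib
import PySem

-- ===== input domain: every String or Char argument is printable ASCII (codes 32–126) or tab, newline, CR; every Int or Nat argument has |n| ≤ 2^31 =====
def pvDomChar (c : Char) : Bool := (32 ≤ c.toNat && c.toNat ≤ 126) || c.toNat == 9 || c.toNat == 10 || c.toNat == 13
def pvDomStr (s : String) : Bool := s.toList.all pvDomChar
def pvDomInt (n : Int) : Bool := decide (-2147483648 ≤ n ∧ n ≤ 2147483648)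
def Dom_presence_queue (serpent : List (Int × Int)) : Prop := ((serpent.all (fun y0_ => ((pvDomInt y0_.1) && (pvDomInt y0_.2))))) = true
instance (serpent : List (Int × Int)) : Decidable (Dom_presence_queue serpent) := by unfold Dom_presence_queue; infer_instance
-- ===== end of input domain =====

-- B does one pass over the body instead of A's four any-scans; equivalence proved on non-empty snakes.

-- ===== PORT A =====
-- A: tete = serpent[0]; four `any` scans each setting one slot of [0,0,0,0].
def presence_queue (serpent : List (Int × Int)) : List Int :=
  match PySem.List.pyGet? serpent 0 with
  | none => []   -- A raises IndexError here; excluded by Pre_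
  | some tete =>
    let ob : List Int := [0, 0, 0, 0]
    let ob := if serpent.any (fun p => p.1 == tete.1 - 20 && p.2 == tete.2) then ob.set 0 1 else ob
    let ob := if serpent.any (fun p => p.1 == tete.1 + 20 && p.2 == tete.2) then ob.set 1 1 else ob
    let ob := if serpent.any (fun p => p.2 == tete.2 - 20 && p.1 == tete.1) then ob.set 2 1 else ob
    let ob := if serpent.any (fun p => p.2 == tete.2 + 20 && p.1 == tete.1) then ob.set 3 1 else ob
    ob

-- ===== PORT B =====
-- B's loop body: classify one segment's offset (dx,dy) from the head into the four flags.
def pqStep (tete : Int × Int) (st : Int × Int × Int × Int) (p : Int × Int) : Int × Int × Int × Int :=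
  let dx := p.1 - tete.1
  let dy := p.2 - tete.2
  if dy == 0 then
    (if dx == -20 then (1, st.2.1, st.2.2.1, st.2.2.2)
     else if dx == 20 then (st.1, 1, st.2.2.1, st.2.2.2)
     else st)
  else if dx == 0 then
    (if dy == -20 then (st.1, st.2.1, 1, st.2.2.2)
     else if dy == 20 then (st.1, st.2.1, st.2.2.1, 1)
     else st)
  else st

def presence_queue_alt (serpent : List (Int × Int)) : List Int :=
  match PySem.List.pyGet? serpent 0 with
  | none => []   -- B raises IndexError here too; excluded by Pre_
  | some tete =>
    let r := serpent.foldl (pqStep tete) (0, 0, 0, 0)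
    [r.1, r.2.1, r.2.2.1, r.2.2.2]

-- ===== PRECONDITION & SPEC =====
-- A indexes serpent[0], so both programs raise IndexError on the empty list; Pre_ excludes only that.
def Pre_presence_queue (serpent : List (Int × Int)) : Prop := serpent ≠ []
instance (serpent : List (Int × Int)) : Decidable (Pre_presence_queue serpent) := by unfold Pre_presence_queue; infer_instance
def pvWitness_presence_queue : (List (Int × Int)) := [(40, 40), (20, 40), (40, 20)]

def Spec_presence_queue (serpent : List (Int × Int)) (out : List Int) : Prop := out = presence_queue_alt serpent
instance (serpent : List (Int × Int)) (out : List Int) : Decidable (Spec_presence_queue serpent out) := by unfold Spec_presence_queue; infer_instance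

-- ===== CLAIM (what is proved, stated in full; the proofs are below) =====
def Claim_equal_presence_queue : Prop := ∀ (serpent : List (Int × Int)), Dom_presence_queue serpent → Pre_presence_queue serpent → Spec_presence_queue serpent (presence_queue serpent)

-- ===== LEMMAS AND PROOFS =====

-- Invariant of B's single pass: each flag ends up 1 iff some segment satisfies that
-- direction's path condition, otherwise keeps its initial value.
theorem pqStep_foldl (t : Int × Int) (xs : List (Int × Int)) (l r u d : Int) :
    xs.foldl (pqStep t) (l, r, u, d) =
      ((if xs.any (fun p => p.2 - t.2 == 0 && p.1 - t.1 == -20) then 1 else l),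
       (if xs.any (fun p => p.2 - t.2 == 0 && p.1 - t.1 == 20) then 1 else r),
       (if xs.any (fun p => !(p.2 - t.2 == 0) && p.1 - t.1 == 0 && p.2 - t.2 == -20) then 1 else u),
       (if xs.any (fun p => !(p.2 - t.2 == 0) && p.1 - t.1 == 0 && p.2 - t.2 == 20) then 1 else d)) := by
  induction xs generalizing l r u d with
  | nil => simp
  | cons x xs ih =>
    obtain ⟨px, py⟩ := x
    simp only [List.foldl_cons, List.any_cons, pqStep]
    by_cases h1 : py - t.2 = 0
    · by_cases h2 : px - t.1 = -20
      · have a1 : (py - t.2 == 0) = true := by simp; omega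
        have a2 : (px - t.1 == -20) = true := by simp; omega
        have a3 : (px - t.1 == 20) = false := by simp; omega
        have a4 : (px - t.1 == 0) = false := by simp; omega
        have a5 : (py - t.2 == -20) = false := by simp; omega
        have a6 : (py - t.2 == 20) = false := by simp; omega
        simp only [a1, a2, a3, a4, a5, a6, Bool.not_true, Bool.not_false, Bool.false_and, Bool.true_and, Bool.and_false, Bool.and_true, Bool.false_or, Bool.true_or, if_true, if_false]
        simp [ih]
      · by_cases h3 : px - t.1 = 20
        · have a1 : (py - t.2 == 0) = true := by simp; omega
          have a2 : (px - t.1 == -20) = false := by simp; omega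
          have a3 : (px - t.1 == 20) = true := by simp; omega
          have a4 : (px - t.1 == 0) = false := by simp; omega
          have a5 : (py - t.2 == -20) = false := by simp; omega
          have a6 : (py - t.2 == 20) = false := by simp; omega
          simp only [a1, a2, a3, a4, a5, a6, Bool.not_true, Bool.not_false, Bool.false_and, Bool.true_and, Bool.and_false, Bool.and_true, Bool.false_or, Bool.true_or, if_true, if_false]
          simp [ih]
        · have a1 : (py - t.2 == 0) = true := by simp; omega
          have a2 : (px - t.1 == -20) = false := by simp; omega
          have a3 : (px - t.1 == 20) = false := by simp; omega
          have a5 : (py - t.2 == -20) = false := by simp; omega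
          have a6 : (py - t.2 == 20) = false := by simp; omega
          simp only [a1, a2, a3, a5, a6, Bool.not_true, Bool.not_false, Bool.false_and, Bool.true_and, Bool.and_false, Bool.and_true, Bool.false_or, Bool.true_or, if_true, if_false]
          simp [ih]
    · by_cases h4 : px - t.1 = 0
      · by_cases h5 : py - t.2 = -20
        · have a1 : (py - t.2 == 0) = false := by simp; omega
          have a2 : (px - t.1 == -20) = false := by simp; omega
          have a3 : (px - t.1 == 20) = false := by simp; omega
          have a4 : (px - t.1 == 0) = true := by simp; omega
          have a5 : (py - t.2 == -20) = true := by simp; omega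
          have a6 : (py - t.2 == 20) = false := by simp; omega
          simp only [a1, a2, a3, a4, a5, a6, Bool.not_true, Bool.not_false, Bool.false_and, Bool.true_and, Bool.and_false, Bool.and_true, Bool.false_or, Bool.true_or, if_true, if_false]
          simp [ih]
        · by_cases h6 : py - t.2 = 20
          · have a1 : (py - t.2 == 0) = false := by simp; omega
            have a2 : (px - t.1 == -20) = false := by simp; omega
            have a3 : (px - t.1 == 20) = false := by simp; omega
            have a4 : (px - t.1 == 0) = true := by simp; omega
            have a5 : (py - t.2 == -20) = false := by simp; omega
            have a6 : (py - t.2 == 20) = true := by simp; omega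
            simp only [a1, a2, a3, a4, a5, a6, Bool.not_true, Bool.not_false, Bool.false_and, Bool.true_and, Bool.and_false, Bool.and_true, Bool.false_or, Bool.true_or, if_true, if_false]
            simp [ih]
          · have a1 : (py - t.2 == 0) = false := by simp; omega
            have a2 : (px - t.1 == -20) = false := by simp; omega
            have a3 : (px - t.1 == 20) = false := by simp; omega
            have a4 : (px - t.1 == 0) = true := by simp; omega
            have a5 : (py - t.2 == -20) = false := by simp; omega
            have a6 : (py - t.2 == 20) = false := by simp; omega
            simp only [a1, a2, a3, a4, a5, a6, Bool.not_true, Bool.not_false, Bool.false_and, Bool.true_and, Bool.and_false, Bool.and_true, Bool.false_or, Bool.true_or, if_true, if_false]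
            simp [ih]
      · have a1 : (py - t.2 == 0) = false := by simp; omega
        have a4 : (px - t.1 == 0) = false := by simp; omega
        simp only [a1, a4, Bool.not_true, Bool.not_false, Bool.false_and, Bool.true_and, Bool.and_false, Bool.and_true, Bool.false_or, Bool.true_or, if_true, if_false]
        simp [ih]

-- The path conditions of B's loop equal A's any-predicates, pointwise; hence the four
-- any-scans of A read off exactly the flags B's single pass accumulates.
theorem any_cond_eq (t : Int × Int) (xs : List (Int × Int)) :
    (xs.any (fun p => p.2 - t.2 == 0 && p.1 - t.1 == -20) = xs.any (fun p => p.1 == t.1 - 20 && p.2 == t.2)) ∧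
    (xs.any (fun p => p.2 - t.2 == 0 && p.1 - t.1 == 20) = xs.any (fun p => p.1 == t.1 + 20 && p.2 == t.2)) ∧
    (xs.any (fun p => !(p.2 - t.2 == 0) && p.1 - t.1 == 0 && p.2 - t.2 == -20) = xs.any (fun p => p.2 == t.2 - 20 && p.1 == t.1)) ∧
    (xs.any (fun p => !(p.2 - t.2 == 0) && p.1 - t.1 == 0 && p.2 - t.2 == 20) = xs.any (fun p => p.2 == t.2 + 20 && p.1 == t.1)) := by
  refine ⟨?_, ?_, ?_, ?_⟩ <;>
    (rw [Bool.eq_iff_iff]; simp only [List.any_eq_true]; constructor <;>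
      (rintro ⟨p, hp, hc⟩; exact ⟨p, hp, by simp at hc ⊢; omega⟩))

theorem presence_queue_spec : Claim_equal_presence_queue := by
  intro serpent _ hpre
  unfold Spec_presence_queue presence_queue presence_queue_alt
  obtain ⟨hd, tl, rfl⟩ := List.exists_cons_of_ne_nil hpre
  have hget : PySem.List.pyGet? (hd :: tl) 0 = some hd := by simp [PySem.List.pyGet?, PySem.List.pyIdx?]
  rw [hget]
  simp only [pqStep_foldl]
  obtain ⟨e1, e2, e3, e4⟩ := any_cond_eq hd (hd :: tl)
  rw [e1, e2, e3, e4]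
  split_ifs <;> rfl
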